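-- pv_equiv track=rewrite | github.com/galvandvictoria-alt/Computational-Geometry | docs/10_corners/context-free_grammar.py | detectar_break_points_simple
-- ===== SOURCE A (Python) =====
-- def contorno_a_f8(contorno):
--     """Convierte lista de puntos a código F8."""
--     dir_map = {(1,0):0, (1,1):1, (0,1):2, (-1,1):3,
--                (-1,0):4, (-1,-1):5, (0,-1):6, (1,-1):7}
--     f8 = []
--     n = len(contorno)
--     for i in range(n):
--         cx, cy = contorno[i]
--         nx, ny = contorno[(i+1) % n]
--         dx, dy = nx - cx, ny - cy
--         if (dx, dy) in dir_map:
--             f8.append(dir_map[(dx, dy)])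
--     return f8
--
-- def f8_a_af8(f8):
--     """Convierte F8 absoluto a AF8 relativo."""
--     if not f8:
--         return []
--     af8 = []
--     n = len(f8)
--     for i in range(n):
--         prev = f8[i-1]
--         curr = f8[i]
--         af8.append((curr - prev) % 8)
--     return af8
--
-- def detectar_break_points_simple(contorno):
--     """
--     Detección simplificada de break points: puntos donde cambia
--     significativamente la dirección del contorno (cambios en F8).
--     Más robusta para imágenes reales.
--     """
--     n = len(contorno)
--     if n < 3:
--         return list(range(n))
--
--     f8 = contorno_a_f8(contorno)
--     af8 = f8_a_af8(f8)
--
--     break_points = []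
--
--     for i in range(n):
--         # Un break point ocurre donde el cambio relativo no es 0
--         # (es decir, donde hay cambio de dirección)
--         if af8[i] != 0:
--             break_points.append(i)
--
--     # Si hay muy pocos, usar todos
--     if len(break_points) < 4:
--         return list(range(0, n, max(1, n//20)))
--
--     return break_points
-- ===== SOURCE B (Python) =====
-- def detectar_break_points_simple(contorno):
--     """
--     Purely geometric detection, no chain code / direction map: index i is a
--     break point exactly when contorno[i] is not the midpoint of its two cyclic
--     neighbours, i.e. the incoming and outgoing steps differ.
--     """
--     n = len(contorno)
--     if n < 3:
--         return list(range(n))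
--
--     break_points = []
--     for i in range(n):
--         px, py = contorno[i - 1]
--         cx, cy = contorno[i]
--         nx, ny = contorno[(i + 1) % n]
--         if (px + nx, py + ny) != (2 * cx, 2 * cy):
--             break_points.append(i)
--
--     if len(break_points) < 4:
--         return list(range(0, n, max(1, n // 20)))
--     return break_points
-- ===== Notes on version B (the rewrite author's own statement) =====
-- stated objective: simpler
-- what changed: B drops the direction-map chain code and the AF8 pass entirely: it detects break points purely geometrically, flagging index i when contorno[i] is not the midpoint of its two cyclic neighbours (equivalent under the 8-neighbour precondition because the F8 direction map is injective), keeping the n<3 and '<4 break points' fallbacks.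
import Mathlib
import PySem

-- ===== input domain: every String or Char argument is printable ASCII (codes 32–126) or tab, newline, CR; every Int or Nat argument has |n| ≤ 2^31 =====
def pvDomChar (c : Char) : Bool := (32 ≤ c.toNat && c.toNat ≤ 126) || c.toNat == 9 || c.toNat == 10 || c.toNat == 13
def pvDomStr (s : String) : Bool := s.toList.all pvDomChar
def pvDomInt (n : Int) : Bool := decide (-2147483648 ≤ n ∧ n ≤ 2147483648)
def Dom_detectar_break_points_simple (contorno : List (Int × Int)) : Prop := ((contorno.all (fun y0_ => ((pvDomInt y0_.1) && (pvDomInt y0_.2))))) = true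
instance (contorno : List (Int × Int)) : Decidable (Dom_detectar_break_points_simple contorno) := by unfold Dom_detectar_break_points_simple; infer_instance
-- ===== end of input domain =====

-- B drops the chain code and the AF8 pass entirely and detects break points
-- geometrically: index i is a break point iff contorno[i] is not the midpoint
-- of its two cyclic neighbours (objective: simpler).

-- ===== PORT A =====
def dirMap : PySem.Dict (Int × Int) Int :=
  PySem.Dict.mk [((1,0),0), ((1,1),1), ((0,1),2), ((-1,1),3),
                 ((-1,0),4), ((-1,-1),5), ((0,-1),6), ((1,-1),7)]

def contorno_a_f8 (contorno : List (Int × Int)) : List Int :=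
  let n := contorno.length
  (List.range n).foldl (fun f8 i =>
    let c := contorno.getD i (0, 0)
    let nx := contorno.getD ((i + 1) % n) (0, 0)
    let d := (nx.1 - c.1, nx.2 - c.2)
    if dirMap.contains d then f8 ++ [dirMap.getD d 0] else f8) []

def f8_a_af8 (f8 : List Int) : List Int :=
  if f8 = [] then []
  else
    (List.range f8.length).foldl (fun (af8 : List Int) (i : Nat) =>
      let prev := PySem.List.pyGetD f8 ((i : Int) - 1) 0
      let curr := f8.getD i 0
      af8 ++ [PySem.Int.mod (curr - prev) 8]) []

def detectar_break_points_simple (contorno : List (Int × Int)) : List Int :=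
  let n := contorno.length
  if n < 3 then PySem.List.pyRange 0 (n : Int) 1
  else
    let f8 := contorno_a_f8 contorno
    let af8 := f8_a_af8 f8
    -- af8[i] raises IndexError when len(af8) < n (some step not in dir_map); excluded by Pre_
    let bps := (List.range n).foldl (fun (acc : List Int) (i : Nat) =>
      if PySem.List.pyGetD af8 (i : Int) 0 ≠ 0 then acc ++ [(i : Int)] else acc) []
    if bps.length < 4 then
      PySem.List.pyRange 0 (n : Int) (max 1 (PySem.Int.floordiv (n : Int) 20))
    else bps

-- ===== PORT B =====
def detectar_break_points_simple_alt (contorno : List (Int × Int)) : List Int :=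
  let n := contorno.length
  if n < 3 then PySem.List.pyRange 0 (n : Int) 1
  else
    let bps := (List.range n).foldl (fun (acc : List Int) (i : Nat) =>
      let p := PySem.List.pyGetD contorno ((i : Int) - 1) (0, 0)
      let c := contorno.getD i (0, 0)
      let nx := contorno.getD ((i + 1) % n) (0, 0)
      if (p.1 + nx.1, p.2 + nx.2) ≠ (2 * c.1, 2 * c.2) then acc ++ [(i : Int)] else acc) []
    if bps.length < 4 then
      PySem.List.pyRange 0 (n : Int) (max 1 (PySem.Int.floordiv (n : Int) 20))
    else bps

-- ===== PRECONDITION & SPEC =====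
-- the step vector from point i to the (cyclically) next point
def stepv (contorno : List (Int × Int)) (i : Nat) : Int × Int :=
  ((contorno.getD ((i + 1) % contorno.length) (0, 0)).1 - (contorno.getD i (0, 0)).1,
   (contorno.getD ((i + 1) % contorno.length) (0, 0)).2 - (contorno.getD i (0, 0)).2)

-- Pre_ excludes exactly the contours of length ≥ 3 in which some step vector to the (cyclically)
-- next point is not one of the eight unit directions: there A raises IndexError (af8 is shorter
-- than n) while B returns normally; on everything else both return.
def Pre_detectar_break_points_simple (contorno : List (Int × Int)) : Prop :=
  contorno.length < 3 ∨
  ∀ i ∈ List.range contorno.length, stepv contorno i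
    ∈ [((1 : Int), (0 : Int)), (1, 1), (0, 1), (-1, 1), (-1, 0), (-1, -1), (0, -1), (1, -1)]
instance (contorno : List (Int × Int)) : Decidable (Pre_detectar_break_points_simple contorno) := by
  unfold Pre_detectar_break_points_simple; infer_instance

def pvWitness_detectar_break_points_simple : (List (Int × Int)) := [(0, 0), (1, 0), (1, 1), (0, 1)]

def Spec_detectar_break_points_simple (contorno : List (Int × Int)) (out : List Int) : Prop := out = detectar_break_points_simple_alt contorno
instance (contorno : List (Int × Int)) (out : List Int) : Decidable (Spec_detectar_break_points_simple contorno out) := by unfold Spec_detectar_break_points_simple; infer_instance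

-- ===== CLAIM (what is proved, stated in full; the proofs are below) =====
def Claim_equal_detectar_break_points_simple : Prop := ∀ (contorno : List (Int × Int)), Dom_detectar_break_points_simple contorno → Pre_detectar_break_points_simple contorno → Spec_detectar_break_points_simple contorno (detectar_break_points_simple contorno)

-- ===== LEMMAS AND PROOFS =====

def dirKeys : List (Int × Int) :=
  [((1 : Int), (0 : Int)), (1, 1), (0, 1), (-1, 1), (-1, 0), (-1, -1), (0, -1), (1, -1)]

def codeOf (contorno : List (Int × Int)) (i : Nat) : Int := dirMap.getD (stepv contorno i) 0

-- predecessor index in the cyclic list of codes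
def pidx (n i : Nat) : Nat := if i = 0 then n - 1 else i - 1

theorem pidx_lt (n i : Nat) (hn : 0 < n) (hi : i < n) : pidx n i < n := by
  unfold pidx; split_ifs <;> omega

theorem dirMap_getD_bounds (p : Int × Int) : 0 ≤ dirMap.getD p 0 ∧ dirMap.getD p 0 < 8 := by
  simp [dirMap, PySem.Dict.getD, PySem.Dict.get?_mk_cons]
  split_ifs <;> simp [PySem.Dict.get?]

theorem dirMap_contains_of_mem (p : Int × Int) (h : p ∈ dirKeys) :
    dirMap.contains p = true := by
  fin_cases h <;> decide

theorem dirMap_inj (p q : Int × Int) (hp : p ∈ dirKeys) (hq : q ∈ dirKeys)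
    (h : dirMap.getD p 0 = dirMap.getD q 0) : p = q := by
  fin_cases hp <;> fin_cases hq <;> simp_all <;> revert h <;> decide

theorem mod8_ne_zero_iff (a b : Int) (ha : 0 ≤ a ∧ a < 8) (hb : 0 ≤ b ∧ b < 8) :
    (PySem.Int.mod (a - b) 8 ≠ 0) ↔ a ≠ b := by
  rw [PySem.Int.mod_eq_emod_of_pos (by omega)]
  omega

theorem f8_eq_map (contorno : List (Int × Int))
    (h : ∀ i ∈ List.range contorno.length, stepv contorno i ∈ dirKeys) :
    contorno_a_f8 contorno = (List.range contorno.length).map (codeOf contorno) := by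
  show List.foldl
      (fun (f8 : List Int) (i : Nat) =>
        if dirMap.contains (stepv contorno i) = true
        then f8 ++ [dirMap.getD (stepv contorno i) 0] else f8)
      [] (List.range contorno.length) = _
  refine (PySem.List.foldl_congr_mem _ _ (fun (f8 : List Int) (i : Nat) => f8 ++ [codeOf contorno i]) _ ?_).trans
    (by rw [PySem.List.foldl_append_singleton_eq_map]; simp)
  intro acc i hi
  rw [dirMap_contains_of_mem _ (h i hi)]
  rfl

theorem af8_eq_map (contorno : List (Int × Int)) (hn : 3 ≤ contorno.length)
    (hf : contorno_a_f8 contorno = (List.range contorno.length).map (codeOf contorno)) :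
    f8_a_af8 (contorno_a_f8 contorno) = (List.range contorno.length).map
      (fun i => PySem.Int.mod (codeOf contorno i - codeOf contorno (pidx contorno.length i)) 8) := by
  have hne : (List.range contorno.length).map (codeOf contorno) ≠ [] := by
    simp only [ne_eq, List.map_eq_nil_iff, List.range_eq_nil]
    omega
  rw [hf]
  unfold f8_a_af8
  rw [if_neg hne]
  simp only [List.length_map, List.length_range]
  refine (PySem.List.foldl_congr_mem _ _
      (fun (af8 : List Int) (i : Nat) =>
        af8 ++ [PySem.Int.mod (codeOf contorno i - codeOf contorno (pidx contorno.length i)) 8]) _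
      ?_).trans
    (by rw [PySem.List.foldl_append_singleton_eq_map]; simp)
  intro acc i hi
  simp only [List.mem_range] at hi
  have hcurr : ((List.range contorno.length).map (codeOf contorno)).getD i 0 = codeOf contorno i := by
    simp [List.getD, hi]
  have hprev : PySem.List.pyGetD ((List.range contorno.length).map (codeOf contorno)) ((i : Int) - 1) 0
      = codeOf contorno (pidx contorno.length i) := by
    rcases Nat.eq_zero_or_pos i with h0 | h0
    · subst h0
      have h1 : ((0 : Nat) : Int) - 1 = -1 := by norm_num
      rw [h1, PySem.List.pyGetD_neg_one _ 0 hne]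
      rw [List.getLast_eq_getElem]
      simp [pidx]
    · have h1 : ((i : Int) - 1) = ((i - 1 : Nat) : Int) := by omega
      rw [h1, PySem.List.pyGetD_natCast]
      have h2 : i - 1 < contorno.length := by omega
      simp [List.getD, h2, pidx, Nat.pos_iff_ne_zero.mp h0]
  show acc ++ [PySem.Int.mod
      (((List.range contorno.length).map (codeOf contorno)).getD i 0
        - PySem.List.pyGetD ((List.range contorno.length).map (codeOf contorno)) ((i : Int) - 1) 0) 8] = _
  rw [hcurr, hprev]

-- the common normal form of both break-point lists
def bpsC (contorno : List (Int × Int)) : List Int :=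
  ((List.range contorno.length).filter
    (fun i => decide (codeOf contorno i ≠ codeOf contorno (pidx contorno.length i)))).map
    (fun (i : Nat) => (i : Int))

theorem portA_eq (contorno : List (Int × Int)) (hn3 : 3 ≤ contorno.length)
    (hsteps : ∀ i ∈ List.range contorno.length, stepv contorno i ∈ dirKeys) :
    detectar_break_points_simple contorno
      = if (bpsC contorno).length < 4 then
          PySem.List.pyRange 0 (contorno.length : Int)
            (max 1 (PySem.Int.floordiv (contorno.length : Int) 20))
        else bpsC contorno := by
  have hf := f8_eq_map contorno hsteps
  have haf := af8_eq_map contorno hn3 hf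
  unfold detectar_break_points_simple
  rw [if_neg (by omega)]
  show (let bps := (List.range contorno.length).foldl (fun (acc : List Int) (i : Nat) =>
          if PySem.List.pyGetD (f8_a_af8 (contorno_a_f8 contorno)) (i : Int) 0 ≠ 0
          then acc ++ [(i : Int)] else acc) [];
        if bps.length < 4 then
          PySem.List.pyRange 0 (contorno.length : Int)
            (max 1 (PySem.Int.floordiv (contorno.length : Int) 20))
        else bps) = _
  have hbps : (List.range contorno.length).foldl (fun (acc : List Int) (i : Nat) =>
        if PySem.List.pyGetD (f8_a_af8 (contorno_a_f8 contorno)) (i : Int) 0 ≠ 0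
        then acc ++ [(i : Int)] else acc) [] = bpsC contorno := by
    rw [PySem.List.foldl_append_ite
      (fun i : Nat => PySem.List.pyGetD (f8_a_af8 (contorno_a_f8 contorno)) (i : Int) 0 ≠ 0)
      (fun i : Nat => (i : Int))]
    simp only [List.nil_append]
    unfold bpsC
    apply congrArg (List.map _)
    apply List.filter_congr
    intro i hi
    simp only [List.mem_range] at hi
    rw [haf, PySem.List.pyGetD_natCast]
    have hg : ((List.range contorno.length).map
        (fun i => PySem.Int.mod (codeOf contorno i - codeOf contorno (pidx contorno.length i)) 8)).getD i 0
        = PySem.Int.mod (codeOf contorno i - codeOf contorno (pidx contorno.length i)) 8 := by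
      simp [List.getD, hi]
    rw [hg]
    exact decide_eq_decide.mpr (mod8_ne_zero_iff _ _ (dirMap_getD_bounds _) (dirMap_getD_bounds _))
  rw [hbps]

-- the incoming step of index i is the outgoing step of its cyclic predecessor
theorem stepv_pidx (contorno : List (Int × Int)) (i : Nat) (hn : 0 < contorno.length)
    (hi : i < contorno.length) :
    stepv contorno (pidx contorno.length i)
      = ((contorno.getD i (0, 0)).1 - (PySem.List.pyGetD contorno ((i : Int) - 1) (0, 0)).1,
         (contorno.getD i (0, 0)).2 - (PySem.List.pyGetD contorno ((i : Int) - 1) (0, 0)).2) := by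
  have hnext : (pidx contorno.length i + 1) % contorno.length = i := by
    unfold pidx; split_ifs with h0
    · subst h0; rw [Nat.sub_add_cancel (by omega), Nat.mod_self]
    · rw [Nat.sub_add_cancel (by omega), Nat.mod_eq_of_lt hi]
  have hprev : PySem.List.pyGetD contorno ((i : Int) - 1) (0, 0)
      = contorno.getD (pidx contorno.length i) (0, 0) := by
    have hne : contorno ≠ [] := by intro h; rw [h] at hn; simp at hn
    rcases Nat.eq_zero_or_pos i with h0 | h0
    · subst h0
      have h1 : ((0 : Nat) : Int) - 1 = -1 := by norm_num
      rw [h1, PySem.List.pyGetD_neg_one _ _ hne, List.getLast_eq_getElem]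
      simp [pidx, List.getD, hn]
    · have h1 : ((i : Int) - 1) = ((i - 1 : Nat) : Int) := by omega
      rw [h1, PySem.List.pyGetD_natCast]
      simp [pidx, Nat.pos_iff_ne_zero.mp h0]
  unfold stepv
  rw [hnext, hprev]

theorem portB_eq (contorno : List (Int × Int)) (hn3 : 3 ≤ contorno.length)
    (hsteps : ∀ i ∈ List.range contorno.length, stepv contorno i ∈ dirKeys) :
    detectar_break_points_simple_alt contorno
      = if (bpsC contorno).length < 4 then
          PySem.List.pyRange 0 (contorno.length : Int)
            (max 1 (PySem.Int.floordiv (contorno.length : Int) 20))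
        else bpsC contorno := by
  unfold detectar_break_points_simple_alt
  rw [if_neg (by omega)]
  have hbps : (List.range contorno.length).foldl (fun (acc : List Int) (i : Nat) =>
      let p := PySem.List.pyGetD contorno ((i : Int) - 1) (0, 0)
      let c := contorno.getD i (0, 0)
      let nx := contorno.getD ((i + 1) % contorno.length) (0, 0)
      if (p.1 + nx.1, p.2 + nx.2) ≠ (2 * c.1, 2 * c.2) then acc ++ [(i : Int)] else acc) []
      = bpsC contorno := by
    rw [PySem.List.foldl_append_ite
      (fun i : Nat =>
        ((PySem.List.pyGetD contorno ((i : Int) - 1) (0, 0)).1 + (contorno.getD ((i + 1) % contorno.length) (0, 0)).1,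
         (PySem.List.pyGetD contorno ((i : Int) - 1) (0, 0)).2 + (contorno.getD ((i + 1) % contorno.length) (0, 0)).2)
          ≠ (2 * (contorno.getD i (0, 0)).1, 2 * (contorno.getD i (0, 0)).2))
      (fun i : Nat => (i : Int))]
    simp only [List.nil_append]
    unfold bpsC
    apply congrArg (List.map _)
    apply List.filter_congr
    intro i hi
    have hi' : i < contorno.length := by simpa using hi
    have hn : 0 < contorno.length := by omega
    apply decide_eq_decide.mpr
    have hmem_i : stepv contorno i ∈ dirKeys := hsteps i hi
    have hmem_p : stepv contorno (pidx contorno.length i) ∈ dirKeys :=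
      hsteps _ (by simpa using pidx_lt contorno.length i hn hi')
    unfold codeOf
    constructor
    · -- midpoint fails → codes differ
      intro hne hcodes
      apply hne
      have hsv : stepv contorno i = stepv contorno (pidx contorno.length i) :=
        dirMap_inj _ _ hmem_i hmem_p hcodes
      rw [stepv_pidx contorno i hn hi'] at hsv
      unfold stepv at hsv
      simp only [Prod.mk.injEq] at hsv
      simp only [Prod.mk.injEq]
      omega
    · -- codes differ → midpoint fails
      intro hcodes hne
      apply hcodes
      have hsv : stepv contorno i = stepv contorno (pidx contorno.length i) := by
        rw [stepv_pidx contorno i hn hi']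
        unfold stepv
        simp only [Prod.mk.injEq] at hne
        simp only [Prod.mk.injEq]
        omega
      rw [hsv]
  rw [hbps]

-- ===== VERDICT (by name: the statement is the Claim_ definition above) =====
theorem detectar_break_points_simple_spec : Claim_equal_detectar_break_points_simple := by
  intro contorno _hdom hpre
  unfold Spec_detectar_break_points_simple
  by_cases hn : contorno.length < 3
  · unfold detectar_break_points_simple detectar_break_points_simple_alt
    rw [if_pos hn, if_pos hn]
  · have hn3 : 3 ≤ contorno.length := by omega
    rcases hpre with h | hsteps
    · omega
    rw [portA_eq contorno hn3 hsteps, portB_eq contorno hn3 hsteps]
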